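-- pv_equiv track=rewrite | github.com/JonathandeGier/adventofcode | solutions/2016/day7.py | is_tls
-- ===== SOURCE A (Python) =====
-- def is_tls(string: str):
--     abbas = []
--     for i in range(1, len(string) - 2):
--         if string[i] == string[i+1] and string[i-1] == string[i+2] and string[i-1] != string[i]:
--             abbas.append(i-1)
--
--     in_hypernet = False
--     for abba_i in abbas:
--         for i in range(abba_i + 4, len(string)):
--             if string[i] == "[":
--                 break
--             elif string[i] == "]":
--                 in_hypernet = True
--
--     if in_hypernet:
--         return False
--
--     if len(abbas) > 0:
--         return True
--
--     return False
-- ===== SOURCE B (Python) =====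
-- def is_tls(string: str):
--     n = len(string)
--     # suffix pass: next_close[j] is True iff the first bracket at index >= j is ']'
--     next_close = [False] * (n + 1)
--     for j in range(n - 1, -1, -1):
--         c = string[j]
--         next_close[j] = c == ']' or (c != '[' and next_close[j + 1])
--     found = False
--     for p in range(n - 3):
--         if string[p + 1] == string[p + 2] and string[p] == string[p + 3] and string[p] != string[p + 1]:
--             if next_close[p + 4]:
--                 return False
--             found = True
--     return found
-- ===== Notes on version B (the rewrite author's own statement) =====
-- stated objective: faster
-- what changed: B replaces A's per-ABBA rescan of the rest of the string with one O(n) right-to-left pass precomputing, for every index, whether the next bracket is ']', then a single forward scan deciding each ABBA in O(1).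
import Mathlib
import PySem

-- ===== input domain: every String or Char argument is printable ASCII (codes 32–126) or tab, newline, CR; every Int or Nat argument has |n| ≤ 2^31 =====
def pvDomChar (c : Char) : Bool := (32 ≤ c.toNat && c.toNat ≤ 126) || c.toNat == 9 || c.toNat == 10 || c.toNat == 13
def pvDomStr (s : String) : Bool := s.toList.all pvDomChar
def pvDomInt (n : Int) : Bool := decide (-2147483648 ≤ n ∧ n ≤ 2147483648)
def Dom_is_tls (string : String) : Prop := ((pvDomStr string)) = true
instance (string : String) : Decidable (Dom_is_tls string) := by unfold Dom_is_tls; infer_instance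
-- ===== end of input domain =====

-- B replaces A's per-ABBA rescan of the rest of the string with one right-to-left pass
-- precomputing, for each index, whether the next bracket is ']', then a single forward scan.

-- ===== PORT A =====
-- the ABBA condition tested at loop index i of A's first loop
def condA (cs : List Char) (i : Int) : Bool :=
  (PySem.List.pyGetD cs i ' ' == PySem.List.pyGetD cs (i + 1) ' ') &&
  (PySem.List.pyGetD cs (i - 1) ' ' == PySem.List.pyGetD cs (i + 2) ' ') &&
  (PySem.List.pyGetD cs (i - 1) ' ' != PySem.List.pyGetD cs i ' ')

-- one step of A's inner scan; st.1 records that `break` happened (state then frozen), st.2 is in_hypernet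
def scanStep (cs : List Char) (st : Bool × Bool) (i : Int) : Bool × Bool :=
  if st.1 then st
  else if PySem.List.pyGetD cs i ' ' = '[' then (true, st.2)
  else if PySem.List.pyGetD cs i ' ' = ']' then (st.1, true)
  else st

def is_tls (string : String) : Bool :=
  let cs := string.toList
  let n : Int := cs.length
  let abbas : List Int :=
    (PySem.List.pyRange 1 (n - 2)).foldl
      (fun acc i => if condA cs i then acc ++ [i - 1] else acc) []
  let in_hypernet : Bool :=
    abbas.foldl (fun ih abba_i =>
      ((PySem.List.pyRange (abba_i + 4) n).foldl (scanStep cs) (false, ih)).2) false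
  if in_hypernet then false
  else if abbas.length > 0 then true
  else false

-- ===== PORT B =====
-- backward pass of Source B: ncList cs is Source B's next_close array (length n+1), filled right-to-left
def ncList (cs : List Char) : List Bool :=
  cs.foldr (fun c acc => (c == ']' || (c != '[' && acc.headD false)) :: acc) [false]

-- the ABBA condition of Source B's forward loop at start index p
def condB (cs : List Char) (p : Nat) : Bool :=
  (cs.getD (p + 1) ' ' == cs.getD (p + 2) ' ') &&
  (cs.getD p ' ' == cs.getD (p + 3) ' ') &&
  (cs.getD p ' ' != cs.getD (p + 1) ' ')

-- forward pass of Source B with its early `return False`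
def tlsScan (cs : List Char) (nc : List Bool) (p : Nat) (found : Bool) : Bool :=
  if _h : p + 3 < cs.length then
    if condB cs p then
      if nc.getD (p + 4) false then false
      else tlsScan cs nc (p + 1) true
    else tlsScan cs nc (p + 1) found
  else found
termination_by cs.length - p

def is_tls_alt (string : String) : Bool :=
  let cs := string.toList
  tlsScan cs (ncList cs) 0 false

-- ===== PRECONDITION & SPEC =====
def Spec_is_tls (string : String) (out : Bool) : Prop := out = is_tls_alt string
instance (string : String) (out : Bool) : Decidable (Spec_is_tls string out) := by unfold Spec_is_tls; infer_instance

-- ===== CLAIM (what is proved, stated in full; the proofs are below) =====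
def Claim_equal_is_tls : Prop := ∀ (string : String), Dom_is_tls string → Spec_is_tls string (is_tls string)

-- ===== LEMMAS AND PROOFS =====

-- semantic reference: is the first bracket of this suffix a ']' ?
def nextClose : List Char → Bool
  | [] => false
  | c :: rest => if c = '[' then false else if c = ']' then true else nextClose rest

theorem ncList_getD (cs : List Char) (q : Nat) :
    (ncList cs).getD q false = nextClose (cs.drop q) := by
  induction cs generalizing q with
  | nil => cases q <;> simp [ncList, nextClose, List.getD]
  | cons c rest ih =>
    have hfold : ncList (c :: rest)
        = (c == ']' || (c != '[' && (ncList rest).headD false)) :: ncList rest := rfl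
    cases q with
    | zero =>
      have h0 : (ncList rest).headD false = nextClose rest := by
        have h := ih 0
        cases hnc : ncList rest with
        | nil => simp [hnc] at h ⊢; exact h
        | cons b bs => simp [hnc] at h ⊢; exact h
      rw [hfold]
      simp only [List.getD_cons_zero, List.drop_zero, h0]
      by_cases h1 : c = '['
      · simp [nextClose, h1]
      · by_cases h2 : c = ']'
        · simp [nextClose, h2]
        · have e2 : (c == ']') = false := beq_eq_false_iff_ne.mpr h2
          have e1 : (c == '[') = false := beq_eq_false_iff_ne.mpr h1
          simp [nextClose, h1, h2, bne, e1, e2]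
    | succ q' =>
      rw [hfold]
      simpa using ih q'

theorem foldl_or_any {α : Type} (l : List α) (g : α → Bool) (i : Bool) :
    l.foldl (fun b x => b || g x) i = (i || l.any g) := by
  induction l generalizing i with
  | nil => simp
  | cons x xs ih => simp [List.foldl, ih, Bool.or_assoc]

theorem scanStep_frozen (cs : List Char) (l : List Int) (ih : Bool) :
    l.foldl (scanStep cs) (true, ih) = (true, ih) := by
  induction l with
  | nil => rfl
  | cons x xs ihl => simp [List.foldl, scanStep, ihl]

theorem condA_eq_condB (cs : List Char) (q : Nat) :
    condA cs ((q : Int) + 1) = condB cs q := by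
  unfold condB
  unfold condA
  have h1 : (q : Int) + 1 = ((q + 1 : Nat) : Int) := by push_cast; ring
  have h2 : (q : Int) + 1 + 1 = ((q + 2 : Nat) : Int) := by push_cast; ring
  have h3 : (q : Int) + 1 - 1 = ((q : Nat) : Int) := by ring
  have h4 : (q : Int) + 1 + 2 = ((q + 3 : Nat) : Int) := by push_cast; ring
  rw [h2, h3, h4, h1]
  simp only [PySem.List.pyGetD_natCast]

theorem scanA_aux (cs : List Char) (k : Nat) :
    ∀ q ih, cs.length - q ≤ k →
      ((PySem.List.pyRange (q : Int) (cs.length : Int)).foldl (scanStep cs) (false, ih)).2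
        = (ih || nextClose (cs.drop q)) := by
  induction k with
  | zero =>
    intro q ih hk
    have hle : cs.length ≤ q := by omega
    rw [PySem.List.pyRange_one_eq_nil (by exact_mod_cast hle)]
    simp [List.drop_eq_nil_of_le hle, nextClose]
  | succ k ihk =>
    intro q ih hk
    by_cases hq : q < cs.length
    · rw [PySem.List.pyRange_one_cons (by exact_mod_cast hq)]
      have hq1 : ((q : Int) + 1) = ((q + 1 : Nat) : Int) := by push_cast; ring
      have hg : PySem.List.pyGetD cs (q : Int) ' ' = cs[q] := by
        rw [PySem.List.pyGetD_natCast]; exact List.getD_eq_getElem cs ' ' hq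
      have hdrop : cs.drop q = cs[q] :: cs.drop (q + 1) := List.drop_eq_getElem_cons hq
      simp only [List.foldl]
      by_cases c1 : cs[q] = '['
      · rw [show scanStep cs (false, ih) (q : Int) = (true, ih) from by
          simp [scanStep, hg, c1]]
        rw [scanStep_frozen, hdrop]
        simp [nextClose, c1]
      · by_cases c2 : cs[q] = ']'
        · rw [show scanStep cs (false, ih) (q : Int) = (false, true) from by
            simp [scanStep, hg, c2]]
          rw [hq1, ihk (q + 1) true (by omega), hdrop]
          simp [nextClose, c2]
        · rw [show scanStep cs (false, ih) (q : Int) = (false, ih) from by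
            simp [scanStep, hg, c1, c2]]
          rw [hq1, ihk (q + 1) ih (by omega), hdrop]
          simp [nextClose, c1, c2]
    · have hle : cs.length ≤ q := by omega
      rw [PySem.List.pyRange_one_eq_nil (by exact_mod_cast hle)]
      simp [List.drop_eq_nil_of_le hle, nextClose]

theorem scanA_eq (cs : List Char) (q : Nat) (ih : Bool) :
    ((PySem.List.pyRange (q : Int) (cs.length : Int)).foldl (scanStep cs) (false, ih)).2
      = (ih || nextClose (cs.drop q)) :=
  scanA_aux cs (cs.length - q) q ih le_rfl

theorem tlsScan_aux (cs : List Char) (nc : List Bool) (k : Nat) :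
    ∀ p found, cs.length - p ≤ k →
      (tlsScan cs nc p found = true ↔
        ((¬ ∃ q, p ≤ q ∧ q + 3 < cs.length ∧ condB cs q = true ∧ nc.getD (q + 4) false = true) ∧
         (found = true ∨ ∃ q, p ≤ q ∧ q + 3 < cs.length ∧ condB cs q = true))) := by
  induction k with
  | zero =>
    intro p found hk
    rw [tlsScan]
    have hnr : ¬ (p + 3 < cs.length) := by omega
    rw [dif_neg hnr]
    constructor
    · intro h
      exact ⟨fun ⟨q, hq, hlen, _⟩ => hnr (by omega), Or.inl h⟩
    · rintro ⟨_, h | ⟨q, hq, hlen, _⟩⟩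
      · exact h
      · exact absurd hlen (by omega)
  | succ k ihk =>
    intro p found hk
    rw [tlsScan]
    by_cases hr : p + 3 < cs.length
    · rw [dif_pos hr]
      have hsplit : ∀ P : Nat → Prop, (∃ q, p ≤ q ∧ P q) ↔ (P p ∨ ∃ q, p + 1 ≤ q ∧ P q) := by
        intro P
        constructor
        · rintro ⟨q, hq, hP⟩
          rcases Nat.eq_or_lt_of_le hq with rfl | hlt
          · exact Or.inl hP
          · exact Or.inr ⟨q, by omega, hP⟩
        · rintro (hP | ⟨q, hq, hP⟩)
          · exact ⟨p, le_rfl, hP⟩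
          · exact ⟨q, by omega, hP⟩
      by_cases hc : condB cs p = true
      · rw [if_pos hc]
        by_cases hn : nc.getD (p + 4) false = true
        · rw [if_pos hn]
          constructor
          · intro h; exact absurd h (by simp)
          · rintro ⟨hbad, _⟩
            exact absurd ⟨p, le_rfl, hr, hc, hn⟩ hbad
        · rw [if_neg hn]
          rw [ihk (p + 1) true (by omega)]
          rw [hsplit (fun q => q + 3 < cs.length ∧ condB cs q = true ∧ nc.getD (q + 4) false = true),
              hsplit (fun q => q + 3 < cs.length ∧ condB cs q = true)]
          simp only [not_or]
          constructor
          · rintro ⟨hb, _⟩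
            exact ⟨⟨fun ⟨_, _, hn'⟩ => hn hn', hb⟩, Or.inr (Or.inl ⟨hr, hc⟩)⟩
          · rintro ⟨⟨_, hb⟩, _⟩
            exact ⟨hb, Or.inl trivial⟩
      · rw [if_neg hc]
        rw [ihk (p + 1) found (by omega)]
        rw [hsplit (fun q => q + 3 < cs.length ∧ condB cs q = true ∧ nc.getD (q + 4) false = true),
            hsplit (fun q => q + 3 < cs.length ∧ condB cs q = true)]
        simp only [not_or]
        constructor
        · rintro ⟨hb, hf⟩
          refine ⟨⟨fun ⟨_, hc', _⟩ => hc hc', hb⟩, ?_⟩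
          rcases hf with hf | hf
          · exact Or.inl hf
          · exact Or.inr (Or.inr hf)
        · rintro ⟨⟨_, hb⟩, hf⟩
          refine ⟨hb, ?_⟩
          rcases hf with hf | hf | hf
          · exact Or.inl hf
          · exact absurd hf.2 hc
          · exact Or.inr hf
    · rw [dif_neg hr]
      constructor
      · intro h
        exact ⟨fun ⟨q, hq, hlen, _⟩ => hr (by omega), Or.inl h⟩
      · rintro ⟨_, h | ⟨q, hq, hlen, _⟩⟩
        · exact h
        · exact absurd hlen (by omega)

theorem tlsScan_iff (cs : List Char) (nc : List Bool) (p : Nat) (found : Bool) :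
    tlsScan cs nc p found = true ↔
      ((¬ ∃ q, p ≤ q ∧ q + 3 < cs.length ∧ condB cs q = true ∧ nc.getD (q + 4) false = true) ∧
       (found = true ∨ ∃ q, p ≤ q ∧ q + 3 < cs.length ∧ condB cs q = true)) :=
  tlsScan_aux cs nc (cs.length - p) p found le_rfl

theorem main_eq (cs : List Char) :
    (let n : Int := cs.length
     let abbas : List Int :=
       (PySem.List.pyRange 1 (n - 2)).foldl
         (fun acc i => if condA cs i then acc ++ [i - 1] else acc) []
     let in_hypernet : Bool :=
       abbas.foldl (fun ih abba_i =>
         ((PySem.List.pyRange (abba_i + 4) n).foldl (scanStep cs) (false, ih)).2) false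
     if in_hypernet then false
     else if abbas.length > 0 then true
     else false)
    = tlsScan cs (ncList cs) 0 false := by
  simp only []
  set n : Int := (cs.length : Int) with hn
  set l := PySem.List.pyRange 1 (n - 2) with hl
  set abbas := l.foldl (fun acc i => if condA cs i then acc ++ [i - 1] else acc) [] with habbas0
  have habbas : abbas = (l.filter (condA cs)).map (fun i => i - 1) := by
    rw [habbas0]
    simpa using PySem.List.foldl_append_if (condA cs) (fun i => i - 1) l []
  have hmem0 : ∀ a ∈ abbas, 0 ≤ a := by
    intro a ha
    rw [habbas] at ha
    simp only [List.mem_map, List.mem_filter] at ha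
    obtain ⟨i, ⟨hil, _⟩, rfl⟩ := ha
    have := (PySem.List.mem_pyRange_one.mp hil).1
    omega
  have hcong : abbas.foldl (fun ih abba_i =>
        ((PySem.List.pyRange (abba_i + 4) n).foldl (scanStep cs) (false, ih)).2) false
      = abbas.foldl (fun ih a => ih || nextClose (cs.drop (a.toNat + 4))) false := by
    apply PySem.List.foldl_congr_mem
    intro acc a ha
    have h0 : 0 ≤ a := hmem0 a ha
    have h4 : (a + 4 : Int) = ((a.toNat + 4 : Nat) : Int) := by omega
    rw [h4, hn, scanA_eq cs (a.toNat + 4) acc]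
  rw [hcong, foldl_or_any, Bool.false_or]
  -- the two semantic conditions
  have hBAD : ((abbas.any (fun a => nextClose (cs.drop (a.toNat + 4)))) = true)
      ↔ (∃ q : Nat, q + 3 < cs.length ∧ condB cs q = true ∧ nextClose (cs.drop (q + 4)) = true) := by
    rw [habbas, List.any_map, List.any_filter]
    simp only [List.any_eq_true, Function.comp]
    constructor
    · rintro ⟨i, hil, hcond⟩
      obtain ⟨hi1, hi2⟩ := PySem.List.mem_pyRange_one.mp hil
      rw [hl] at hil
      obtain ⟨hA, hg⟩ := Bool.and_eq_true_iff.mp hcond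
      refine ⟨(i - 1).toNat, by omega, ?_, ?_⟩
      · rw [← condA_eq_condB]
        have : ((i - 1).toNat : Int) + 1 = i := by omega
        rw [this]; exact hA
      · simpa using hg
    · rintro ⟨q, hq, hcond, hnc⟩
      refine ⟨(q : Int) + 1, PySem.List.mem_pyRange_one.mpr ⟨by omega, by omega⟩, ?_⟩
      rw [Bool.and_eq_true_iff]
      refine ⟨by rw [condA_eq_condB]; exact hcond, ?_⟩
      have : ((q : Int) + 1 - 1).toNat = q := by omega
      rw [this]; exact hnc
  have hANY : (abbas.length > 0)
      ↔ (∃ q : Nat, q + 3 < cs.length ∧ condB cs q = true) := by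
    rw [habbas, List.length_map]
    constructor
    · intro h
      have hne : l.filter (condA cs) ≠ [] := by
        intro hnil; rw [hnil] at h; simp at h
      obtain ⟨i, hif⟩ := List.exists_mem_of_ne_nil _ hne
      have hil := List.mem_of_mem_filter hif
      have hA := List.of_mem_filter hif
      obtain ⟨hi1, hi2⟩ := PySem.List.mem_pyRange_one.mp (hl ▸ hil)
      refine ⟨(i - 1).toNat, by omega, ?_⟩
      rw [← condA_eq_condB]
      have : ((i - 1).toNat : Int) + 1 = i := by omega
      rw [this]; exact hA
    · rintro ⟨q, hq, hcond⟩
      have hmem : ((q : Int) + 1) ∈ l.filter (condA cs) := by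
        rw [List.mem_filter]
        exact ⟨hl ▸ PySem.List.mem_pyRange_one.mpr ⟨by omega, by omega⟩,
          by rw [condA_eq_condB]; exact hcond⟩
      exact List.length_pos_of_mem hmem
  have hB : (tlsScan cs (ncList cs) 0 false = true)
      ↔ ((¬ ∃ q : Nat, q + 3 < cs.length ∧ condB cs q = true ∧ nextClose (cs.drop (q + 4)) = true) ∧
         (∃ q : Nat, q + 3 < cs.length ∧ condB cs q = true)) := by
    rw [tlsScan_iff]
    constructor
    · rintro ⟨hb, hf⟩
      refine ⟨fun ⟨q, h1, h2, h3⟩ => hb ⟨q, Nat.zero_le q, h1, h2, by rw [ncList_getD]; exact h3⟩, ?_⟩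
      rcases hf with hf | ⟨q, _, h1, h2⟩
      · exact absurd hf (by simp)
      · exact ⟨q, h1, h2⟩
    · rintro ⟨hb, q, h1, h2⟩
      refine ⟨fun ⟨q', _, h1', h2', h3'⟩ => hb ⟨q', h1', h2', by rw [ncList_getD] at h3'; exact h3'⟩, ?_⟩
      exact Or.inr ⟨q, Nat.zero_le q, h1, h2⟩
  by_cases hbad : (∃ q : Nat, q + 3 < cs.length ∧ condB cs q = true ∧ nextClose (cs.drop (q + 4)) = true)
  · have h1 : abbas.any (fun a => nextClose (cs.drop (a.toNat + 4))) = true := hBAD.mpr hbad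
    have h2 : tlsScan cs (ncList cs) 0 false = false := by
      rcases Bool.eq_false_or_eq_true (tlsScan cs (ncList cs) 0 false) with h | h
      · exact absurd hbad (hB.mp h).1
      · exact h
    rw [h1, h2]; simp
  · have h1 : abbas.any (fun a => nextClose (cs.drop (a.toNat + 4))) = false := by
      rcases Bool.eq_false_or_eq_true (abbas.any (fun a => nextClose (cs.drop (a.toNat + 4)))) with h | h
      · exact absurd (hBAD.mp h) hbad
      · exact h
    rw [h1]
    by_cases hany : (∃ q : Nat, q + 3 < cs.length ∧ condB cs q = true)
    · have h2 : tlsScan cs (ncList cs) 0 false = true := hB.mpr ⟨hbad, hany⟩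
      rw [h2]
      simp [hANY.mpr hany]
    · have h2 : tlsScan cs (ncList cs) 0 false = false := by
        rcases Bool.eq_false_or_eq_true (tlsScan cs (ncList cs) 0 false) with h | h
        · exact absurd (hB.mp h).2 hany
        · exact h
      rw [h2]
      have h3 : ¬ (abbas.length > 0) := fun h => hany (hANY.mp h)
      simp [h3]

-- ===== VERDICT (by name: the statement is the Claim_ definition above) =====
theorem is_tls_spec : Claim_equal_is_tls := by
  intro string _
  unfold Spec_is_tls is_tls is_tls_alt
  exact main_eq string.toList
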